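-- pv_equiv track=rewrite | github.com/KaisChebata/Course-1-Mathematical-Thinking-in-Computer-Science | test.py | change_5_7
-- ===== SOURCE A (Python) =====
-- def change_5_7(amount):
--     assert amount >= 24
--
--     if amount == 24:
--         return [5, 5, 7, 7]
--     if amount == 25:
--         return [5, 5, 5, 5, 5]
--     if amount == 26:
--         return [5, 7, 7, 7]
--     if amount == 27:
--         return [5, 5, 5, 5, 7]
--     if amount == 28:
--         return [7, 7, 7, 7]
--
--     coins = change_5_7(amount - 5)
--     coins.append(5)
--
--     return coins
-- ===== SOURCE B (Python) =====
-- def change_5_7(amount):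
--     assert amount >= 24
--     r = amount % 5
--     if r == 4:
--         base, base_amt = [5, 5, 7, 7], 24
--     elif r == 0:
--         base, base_amt = [5, 5, 5, 5, 5], 25
--     elif r == 1:
--         base, base_amt = [5, 7, 7, 7], 26
--     elif r == 2:
--         base, base_amt = [5, 5, 5, 5, 7], 27
--     else:
--         base, base_amt = [7, 7, 7, 7], 28
--     return base + [5] * ((amount - base_amt) // 5)
-- ===== Notes on version B (the rewrite author's own statement) =====
-- stated objective: alternative
-- what changed: Replaces the strip-5-and-recurse decomposition with a direct residue-mod-5 construction: pick the base 7s-block from amount % 5 and append the remaining fives with list multiplication.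
import Mathlib
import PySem

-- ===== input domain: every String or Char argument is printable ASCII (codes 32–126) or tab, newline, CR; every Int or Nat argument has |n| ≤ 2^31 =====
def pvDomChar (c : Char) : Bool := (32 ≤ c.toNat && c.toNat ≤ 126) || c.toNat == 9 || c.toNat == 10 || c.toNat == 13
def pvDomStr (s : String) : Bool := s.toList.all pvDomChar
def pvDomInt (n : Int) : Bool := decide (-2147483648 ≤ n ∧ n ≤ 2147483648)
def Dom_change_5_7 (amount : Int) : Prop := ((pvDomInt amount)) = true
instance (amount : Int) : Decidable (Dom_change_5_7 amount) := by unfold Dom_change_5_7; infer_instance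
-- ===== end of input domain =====

-- B replaces A's strip-5s recursion with a direct residue-mod-5 construction (no recursion).

-- ===== PORT A =====
-- A recurses on amount-5; the assert (amount >= 24) raising is excluded by Pre_.
def change_5_7 (amount : Int) : List Int :=
  if _h : amount < 24 then []  -- assert fails in Python: outside Pre_
  else if amount = 24 then [5, 5, 7, 7]
  else if amount = 25 then [5, 5, 5, 5, 5]
  else if amount = 26 then [5, 7, 7, 7]
  else if amount = 27 then [5, 5, 5, 5, 7]
  else if amount = 28 then [7, 7, 7, 7]
  else change_5_7 (amount - 5) ++ [5]
termination_by (amount - 24).toNat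
decreasing_by omega

-- ===== PORT B =====
def change_5_7_alt (amount : Int) : List Int :=
  let r := PySem.Int.mod amount 5
  let (base, baseAmt) : List Int × Int :=
    if r = 4 then ([5, 5, 7, 7], 24)
    else if r = 0 then ([5, 5, 5, 5, 5], 25)
    else if r = 1 then ([5, 7, 7, 7], 26)
    else if r = 2 then ([5, 5, 5, 5, 7], 27)
    else ([7, 7, 7, 7], 28)
  base ++ List.replicate (PySem.Int.floordiv (amount - baseAmt) 5).toNat 5

-- ===== PRECONDITION & SPEC =====
-- Pre_ excludes amount < 24, where A's assert raises AssertionError.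
def Pre_change_5_7 (amount : Int) : Prop := 24 ≤ amount
instance (amount : Int) : Decidable (Pre_change_5_7 amount) := by unfold Pre_change_5_7; infer_instance
def pvWitness_change_5_7 : Int := 37
def Spec_change_5_7 (amount : Int) (out : List Int) : Prop := out = change_5_7_alt amount
instance (amount : Int) (out : List Int) : Decidable (Spec_change_5_7 amount out) := by unfold Spec_change_5_7; infer_instance

-- ===== CLAIM (what is proved, stated in full; the proofs are below) =====
def Claim_equal_change_5_7 : Prop := ∀ (amount : Int), Dom_change_5_7 amount → Pre_change_5_7 amount → Spec_change_5_7 amount (change_5_7 amount)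

-- ===== LEMMAS AND PROOFS =====

-- Python's % and // for the positive divisor 5, in Lean's emod/ediv terms.
lemma mod5_eq (a : Int) : PySem.Int.mod a 5 = a % 5 := by
  simp [PySem.Int.mod, Int.fmod_eq_emod]

-- B's value gains a trailing 5 when amount grows by 5 (same residue, one more replicate).
lemma alt_step (amount : Int) (h : 29 ≤ amount) :
    change_5_7_alt amount = change_5_7_alt (amount - 5) ++ [5] := by
  have hk : amount % 5 = 0 ∨ amount % 5 = 1 ∨ amount % 5 = 2 ∨ amount % 5 = 3 ∨
      amount % 5 = 4 := by omega
  unfold change_5_7_alt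
  rcases hk with hk | hk | hk | hk | hk <;>
  · have hk' : (amount - 5) % 5 = amount % 5 := by omega
    simp only [mod5_eq, hk', hk]
    norm_num
    rw [← List.replicate_succ']
    congr 1
    omega

lemma main_eq (amount : Int) (h : 24 ≤ amount) :
    change_5_7 amount = change_5_7_alt amount := by
  by_cases hs : amount ≤ 28
  · interval_cases amount <;> (rw [change_5_7]; decide)
  · have h29 : 29 ≤ amount := by omega
    rw [change_5_7, alt_step amount h29]
    have ih := main_eq (amount - 5) (by omega)
    rw [← ih]
    split_ifs <;> first | rfl | omega
termination_by (amount - 24).toNat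
decreasing_by omega

-- ===== VERDICT (by name: the statement is the Claim_ definition above) =====
theorem change_5_7_spec : Claim_equal_change_5_7 := by
  intro amount _ hpre
  exact main_eq amount hpre
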